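-- pv_equiv track=rewrite | github.com/ZeyuPing/SYSU_AI_LAB | Lab3_Codes/MGU.py | parse_predicate
-- ===== SOURCE A (Python) =====
-- def parse_predicate(formula):
--     pred_name = formula[:formula.find('(')]
--     args_str = formula[formula.find('(')+1:formula.rfind(')')]
--     args = []
--     current = ""
--     parentheses = 0
--     for c in args_str:
--         if c == '(':
--             parentheses += 1
--             current += c
--         elif c == ')':
--             parentheses -= 1
--             current += c
--         elif c == ',' and parentheses == 0:
--             args.append(current.strip())
--             current = ""
--         else:
--             current += c
--     if current:
--         args.append(current.strip())
--     return pred_name, args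
-- ===== SOURCE B (Python) =====
-- def parse_predicate(formula):
--     pred_name = formula[:formula.find('(')]
--     args_str = formula[formula.find('(')+1:formula.rfind(')')]
--     # one pass recording the indices of depth-0 commas, then slice the segments out
--     cuts = []
--     depth = 0
--     for j, c in enumerate(args_str):
--         if c == '(':
--             depth += 1
--         elif c == ')':
--             depth -= 1
--         elif c == ',' and depth == 0:
--             cuts.append(j)
--     segments = []
--     prev = 0
--     for j in cuts:
--         segments.append(args_str[prev:j])
--         prev = j + 1
--     tail = args_str[prev:]
--     args = [seg.strip() for seg in segments]
--     if tail:
--         args.append(tail.strip())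
--     return pred_name, args
-- ===== Notes on version B (the rewrite author's own statement) =====
-- stated objective: alternative
-- what changed: Instead of accumulating each argument character by character in a growing buffer, B scans once recording the indices of depth-0 commas and then slices the raw segments out of args_str by index, stripping each; the non-empty test is kept on the raw tail slice.
import Mathlib
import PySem

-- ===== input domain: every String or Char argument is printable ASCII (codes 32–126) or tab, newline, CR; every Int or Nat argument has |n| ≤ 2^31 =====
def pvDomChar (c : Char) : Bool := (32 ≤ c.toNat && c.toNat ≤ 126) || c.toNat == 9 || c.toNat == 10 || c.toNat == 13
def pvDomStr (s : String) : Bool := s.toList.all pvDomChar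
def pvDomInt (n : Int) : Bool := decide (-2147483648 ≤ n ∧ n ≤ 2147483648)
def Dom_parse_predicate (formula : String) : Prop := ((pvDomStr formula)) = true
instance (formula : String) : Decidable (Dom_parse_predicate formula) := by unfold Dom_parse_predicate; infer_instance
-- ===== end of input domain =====

-- B records the positions of depth-0 commas in one pass and slices the segments out by index,
-- instead of A's character-by-character accumulator; objective: alternative decomposition, same cost.

-- ===== PORT A =====
-- one loop iteration of A: state = (args, current, parentheses)
def pvStepA (st : List String × List Char × Int) (c : Char) : List String × List Char × Int :=
  if c = '(' then (st.1, st.2.1 ++ [c], st.2.2 + 1)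
  else if c = ')' then (st.1, st.2.1 ++ [c], st.2.2 - 1)
  else if c = ',' ∧ st.2.2 = 0 then (st.1 ++ [String.ofList (PySem.Chars.strip st.2.1)], [], st.2.2)
  else (st.1, st.2.1 ++ [c], st.2.2)

def parse_predicate (formula : String) : String × List String :=
  let pred_name := PySem.Str.slice formula none (some (PySem.Str.find formula "("))
  let args_str := PySem.Str.slice formula (some (PySem.Str.find formula "(" + 1)) (some (PySem.Str.rfind formula ")"))
  let st := args_str.toList.foldl pvStepA ([], [], 0)
  (pred_name, if st.2.1 ≠ [] then st.1 ++ [String.ofList (PySem.Chars.strip st.2.1)] else st.1)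

-- ===== PORT B =====
-- one iteration of B's first loop: state = (cuts, depth), input = (index, char) from enumerate
def pvStepCut (st : List Int × Int) (jc : Int × Char) : List Int × Int :=
  if jc.2 = '(' then (st.1, st.2 + 1)
  else if jc.2 = ')' then (st.1, st.2 - 1)
  else if jc.2 = ',' ∧ st.2 = 0 then (st.1 ++ [jc.1], st.2)
  else (st.1, st.2)

-- one iteration of B's second loop: state = (segments, prev)
def pvStepSeg (s : List Char) (st : List (List Char) × Int) (j : Int) : List (List Char) × Int :=
  (st.1 ++ [PySem.List.slice s (some st.2) (some j)], j + 1)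

def parse_predicate_alt (formula : String) : String × List String :=
  let pred_name := PySem.Str.slice formula none (some (PySem.Str.find formula "("))
  let args_str := PySem.Str.slice formula (some (PySem.Str.find formula "(" + 1)) (some (PySem.Str.rfind formula ")"))
  let s := args_str.toList
  let cuts := ((PySem.List.enumerate s).foldl pvStepCut ([], 0)).1
  let sp := cuts.foldl (pvStepSeg s) ([], 0)
  let tail := PySem.List.slice s (some sp.2) none
  let args := sp.1.map (fun seg => String.ofList (PySem.Chars.strip seg))
  (pred_name, if tail ≠ [] then args ++ [String.ofList (PySem.Chars.strip tail)] else args)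

-- ===== PRECONDITION & SPEC =====
def Spec_parse_predicate (formula : String) (out : String × List String) : Prop := out = parse_predicate_alt formula
instance (formula : String) (out : String × List String) : Decidable (Spec_parse_predicate formula out) := by unfold Spec_parse_predicate; infer_instance

-- ===== CLAIM (what is proved, stated in full; the proofs are below) =====
def Claim_equal_parse_predicate : Prop := ∀ (formula : String), Dom_parse_predicate formula → Spec_parse_predicate formula (parse_predicate formula)

-- ===== LEMMAS AND PROOFS =====

-- common specification of the argument list produced from the char list cs of args_str,
-- given the pending buffer cur and current depth d
def pvSpec (cs : List Char) (cur : List Char) (d : Int) : List String :=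
  match cs with
  | [] => if cur ≠ [] then [String.ofList (PySem.Chars.strip cur)] else []
  | c :: cs' =>
    if c = '(' then pvSpec cs' (cur ++ [c]) (d + 1)
    else if c = ')' then pvSpec cs' (cur ++ [c]) (d - 1)
    else if c = ',' ∧ d = 0 then String.ofList (PySem.Chars.strip cur) :: pvSpec cs' [] 0
    else pvSpec cs' (cur ++ [c]) d

-- recursive form of B's cut positions, start index j
def pvCuts (cs : List Char) (d : Int) (j : Int) : List Int :=
  match cs with
  | [] => []
  | c :: cs' =>
    if c = '(' then pvCuts cs' (d + 1) (j + 1)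
    else if c = ')' then pvCuts cs' (d - 1) (j + 1)
    else if c = ',' ∧ d = 0 then j :: pvCuts cs' 0 (j + 1)
    else pvCuts cs' d (j + 1)

-- recursive forms of B's second loop
def pvSegs (s : List Char) (prev : Int) (cuts : List Int) : List (List Char) :=
  match cuts with
  | [] => []
  | j :: js => PySem.List.slice s (some prev) (some j) :: pvSegs s (j + 1) js

def pvPrev (prev : Int) (cuts : List Int) : Int :=
  match cuts with
  | [] => prev
  | j :: js => pvPrev (j + 1) js

-- B's final argument list, from s, the current prev and the remaining cut list
def pvArgsB (s : List Char) (prev : Int) (cuts : List Int) : List String :=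
  (pvSegs s prev cuts).map (fun seg => String.ofList (PySem.Chars.strip seg)) ++
    (if PySem.List.slice s (some (pvPrev prev cuts)) none ≠ [] then
      [String.ofList (PySem.Chars.strip (PySem.List.slice s (some (pvPrev prev cuts)) none))] else [])

theorem pvArgsB_cons (s : List Char) (prev j : Int) (js : List Int) :
    pvArgsB s prev (j :: js) =
      String.ofList (PySem.Chars.strip (PySem.List.slice s (some prev) (some j))) :: pvArgsB s (j + 1) js := rfl

-- A's loop computes pvSpec
theorem pvA_loop (cs : List Char) (args : List String) (cur : List Char) (d : Int) :
    (if (cs.foldl pvStepA (args, cur, d)).2.1 ≠ [] then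
        (cs.foldl pvStepA (args, cur, d)).1 ++
          [String.ofList (PySem.Chars.strip (cs.foldl pvStepA (args, cur, d)).2.1)]
      else (cs.foldl pvStepA (args, cur, d)).1) = args ++ pvSpec cs cur d := by
  induction cs generalizing args cur d with
  | nil =>
    simp only [List.foldl_nil, pvSpec]
    by_cases h : cur = [] <;> simp [h]
  | cons c cs ih =>
    simp only [List.foldl_cons, pvStepA, pvSpec]
    by_cases h1 : c = '('
    · simp only [if_pos h1]; exact ih args (cur ++ [c]) (d + 1)
    · by_cases h2 : c = ')'
      · simp only [if_neg h1, if_pos h2]; exact ih args (cur ++ [c]) (d - 1)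
      · by_cases h3 : c = ',' ∧ d = 0
        · simp only [if_neg h1, if_neg h2, if_pos h3]
          rw [ih, h3.2]; simp
        · simp only [if_neg h1, if_neg h2, if_neg h3]; exact ih args (cur ++ [c]) d

-- the enumerate fold computes pvCuts
theorem pvB_cuts (cs : List Char) (acc : List Int) (d j : Int) :
    ((PySem.List.enumerate cs j).foldl pvStepCut (acc, d)).1 = acc ++ pvCuts cs d j := by
  induction cs generalizing acc d j with
  | nil => simp [PySem.List.enumerate_nil, pvCuts]
  | cons c cs ih =>
    rw [PySem.List.enumerate_cons]
    simp only [List.foldl_cons, pvStepCut, pvCuts]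
    by_cases h1 : c = '('
    · simp only [if_pos h1]; exact ih acc (d + 1) (j + 1)
    · by_cases h2 : c = ')'
      · simp only [if_neg h1, if_pos h2]; exact ih acc (d - 1) (j + 1)
      · by_cases h3 : c = ',' ∧ d = 0
        · simp only [if_neg h1, if_neg h2, if_pos h3]
          rw [ih, h3.2]; simp
        · simp only [if_neg h1, if_neg h2, if_neg h3]; exact ih acc d (j + 1)

-- the segment fold computes pvSegs / pvPrev
theorem pvB_segs (s : List Char) (cuts : List Int) (segs : List (List Char)) (prev : Int) :
    cuts.foldl (pvStepSeg s) (segs, prev) = (segs ++ pvSegs s prev cuts, pvPrev prev cuts) := by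
  induction cuts generalizing segs prev with
  | nil => simp [pvSegs, pvPrev]
  | cons j js ih => simp [pvStepSeg, pvSegs, pvPrev, ih, List.append_assoc]

-- main B-side lemma: with s = pre ++ mid ++ rest, prev at the start of mid and cuts taken in rest,
-- B's slicing produces exactly pvSpec rest mid d
theorem pvB_main (rest : List Char) (pre mid : List Char) (d : Int) :
    pvArgsB (pre ++ mid ++ rest) (pre.length : Int)
        (pvCuts rest d ((pre.length : Int) + (mid.length : Int)))
      = pvSpec rest mid d := by
  induction rest generalizing pre mid d with
  | nil =>
    simp only [pvCuts, pvSpec, List.append_nil, pvArgsB, pvSegs, pvPrev, List.map_nil,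
      List.nil_append]
    rw [PySem.List.slice_from_natCast, List.drop_left]
  | cons c cs ih =>
    simp only [pvCuts, pvSpec]
    by_cases h1 : c = '('
    · simp only [if_pos h1]
      have h := ih pre (mid ++ [c]) (d + 1)
      simp only [List.append_assoc, List.cons_append, List.nil_append,
        List.length_append, List.length_cons, List.length_nil] at h ⊢
      push_cast at h ⊢
      simp only [add_assoc] at h ⊢
      exact h
    · by_cases h2 : c = ')'
      · simp only [if_neg h1, if_pos h2]
        have h := ih pre (mid ++ [c]) (d - 1)
        simp only [List.append_assoc, List.cons_append, List.nil_append,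
          List.length_append, List.length_cons, List.length_nil] at h ⊢
        push_cast at h ⊢
        simp only [add_assoc] at h ⊢
        exact h
      · by_cases h3 : c = ',' ∧ d = 0
        · simp only [if_neg h1, if_neg h2, if_pos h3]
          rw [pvArgsB_cons]
          congr 1
          · congr 2
            rw [PySem.List.slice_natCast_add, List.append_assoc, List.drop_left, List.take_left]
          · have h := ih (pre ++ mid ++ [c]) [] 0
            simp only [List.append_assoc, List.cons_append,       List.nil_append, List.length_append, List.length_cons, List.length_nil] at h ⊢
            push_cast at h ⊢
            simp only [add_zero, add_assoc] at h ⊢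
            exact h
        · simp only [if_neg h1, if_neg h2, if_neg h3]
          have h := ih pre (mid ++ [c]) d
          simp only [List.append_assoc, List.cons_append, List.nil_append,
            List.length_append, List.length_cons, List.length_nil] at h ⊢
          push_cast at h ⊢
          simp only [add_assoc] at h ⊢
          exact h

-- the two argument lists coincide for any char list s (the args_str of both ports)
theorem pv_args_eq (s : List Char) :
    (if (s.foldl pvStepA ([], [], 0)).2.1 ≠ [] then
        (s.foldl pvStepA ([], [], 0)).1 ++
          [String.ofList (PySem.Chars.strip (s.foldl pvStepA ([], [], 0)).2.1)]
      else (s.foldl pvStepA ([], [], 0)).1)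
    = (if PySem.List.slice s
          (some ((((PySem.List.enumerate s).foldl pvStepCut ([], 0)).1.foldl (pvStepSeg s) ([], 0)).2)) none ≠ [] then
        (((PySem.List.enumerate s).foldl pvStepCut ([], 0)).1.foldl (pvStepSeg s) ([], 0)).1.map
            (fun seg => String.ofList (PySem.Chars.strip seg)) ++
          [String.ofList (PySem.Chars.strip (PySem.List.slice s
            (some ((((PySem.List.enumerate s).foldl pvStepCut ([], 0)).1.foldl (pvStepSeg s) ([], 0)).2)) none))]
      else (((PySem.List.enumerate s).foldl pvStepCut ([], 0)).1.foldl (pvStepSeg s) ([], 0)).1.map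
            (fun seg => String.ofList (PySem.Chars.strip seg))) := by
  rw [pvA_loop s [] [] 0, pvB_cuts s [] 0 0]
  simp only [List.nil_append]
  rw [pvB_segs s (pvCuts s 0 0) [] 0]
  simp only [List.nil_append]
  have hM := pvB_main s [] [] 0
  simp only [List.nil_append, List.length_nil, Nat.cast_zero, add_zero] at hM
  rw [← hM, pvArgsB]
  split <;> simp

-- ===== VERDICT (by name: the statement is the Claim_ definition above) =====
theorem parse_predicate_spec : Claim_equal_parse_predicate := by
  intro formula _
  unfold Spec_parse_predicate
  simp only [parse_predicate, parse_predicate_alt, Prod.mk.injEq]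
  exact ⟨trivial, pv_args_eq _⟩
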